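-- pv_equiv track=rewrite | github.com/House1904/Personal_Project_AI | search_algorithms.py | get_valid_actions_q
-- ===== SOURCE A (Python) =====
-- def get_valid_actions_q(state_tuple):
--     state = [list(row) for row in state_tuple]
--     x, y = next((r, c) for r in range(3) for c in range(3) if state[r][c] == 0)
--     actions = []
--     if x > 0:
--         actions.append(0)  # lên
--     if x < 2:
--         actions.append(1)  # xuống
--     if y > 0:
--         actions.append(2)  # trái
--     if y < 2:
--         actions.append(3)  # phải
--     return actions
-- ===== SOURCE B (Python) =====
-- # Static move table: MOVES[3*r+c] lists the legal actions for the blank at (r, c).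
-- MOVES = (
--     (1, 3), (1, 2, 3), (1, 2),
--     (0, 1, 3), (0, 1, 2, 3), (0, 1, 2),
--     (0, 3), (0, 2, 3), (0, 2),
-- )
--
-- def get_valid_actions_q(state_tuple):
--     r, c = next((r, c) for r in range(3) for c in range(3) if state_tuple[r][c] == 0)
--     return list(MOVES[3 * r + c])
-- ===== Notes on version B (the rewrite author's own statement) =====
-- stated objective: idiomatic
-- what changed: B replaces the four boundary-check conditionals by a precomputed static move table indexed by the blank's flat position 3*r+c (the blank search via next(...) is kept).
import Mathlib
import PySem

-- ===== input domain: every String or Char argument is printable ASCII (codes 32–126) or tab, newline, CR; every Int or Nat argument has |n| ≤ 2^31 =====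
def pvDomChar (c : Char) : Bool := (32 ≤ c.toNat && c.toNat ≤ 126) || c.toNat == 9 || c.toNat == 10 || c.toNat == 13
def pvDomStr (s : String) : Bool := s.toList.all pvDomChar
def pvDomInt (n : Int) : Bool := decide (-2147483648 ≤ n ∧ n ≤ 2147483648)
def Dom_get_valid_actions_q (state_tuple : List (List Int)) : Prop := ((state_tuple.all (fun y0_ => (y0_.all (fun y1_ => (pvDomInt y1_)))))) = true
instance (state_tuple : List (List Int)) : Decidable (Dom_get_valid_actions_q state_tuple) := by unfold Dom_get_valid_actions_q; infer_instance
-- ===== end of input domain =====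

-- B replaces A's four boundary-check conditionals by a precomputed static move table
-- indexed by the blank's flat position; the blank search itself is unchanged.
-- Equivalence of the RETURN values is proved on Pre_ (the inputs where A returns).

-- ===== PORT A =====
-- the pairs the generator 'for r in range(3) for c in range(3)' yields, in order
def pvPairsA : List (Int × Int) :=
  (PySem.List.pyRange 0 3 1).flatMap (fun r => (PySem.List.pyRange 0 3 1).map (fun c => (r, c)))

-- evaluation of the generator: first (r,c) with state[r][c] == 0; none = IndexError/StopIteration
def pvScanA (state : List (List Int)) : List (Int × Int) → Option (Int × Int)
  | [] => none
  | (r, c) :: rest =>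
    match PySem.List.pyGet? state r with
    | none => none
    | some row =>
      match PySem.List.pyGet? row c with
      | none => none
      | some v => if v = 0 then some (r, c) else pvScanA state rest

def get_valid_actions_q (state_tuple : List (List Int)) : List Int :=
  let state := state_tuple.map (fun row => row)
  match pvScanA state pvPairsA with
  | none => []  -- Python raises here (StopIteration or IndexError); excluded by Pre_
  | some (x, y) =>
    let actions : List Int := []
    let actions := if x > 0 then actions ++ [0] else actions
    let actions := if x < 2 then actions ++ [1] else actions
    let actions := if y > 0 then actions ++ [2] else actions
    let actions := if y < 2 then actions ++ [3] else actions
    actions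

-- ===== PORT B =====
def pvMovesB : List (List Int) :=
  [[1, 3], [1, 2, 3], [1, 2],
   [0, 1, 3], [0, 1, 2, 3], [0, 1, 2],
   [0, 3], [0, 2, 3], [0, 2]]

def pvPairsB : List (Int × Int) :=
  (PySem.List.pyRange 0 3 1).flatMap (fun r => (PySem.List.pyRange 0 3 1).map (fun c => (r, c)))

def pvScanB (state : List (List Int)) : List (Int × Int) → Option (Int × Int)
  | [] => none
  | (r, c) :: rest =>
    match PySem.List.pyGet? state r with
    | none => none
    | some row =>
      match PySem.List.pyGet? row c with
      | none => none
      | some v => if v = 0 then some (r, c) else pvScanB state rest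

def get_valid_actions_q_alt (state_tuple : List (List Int)) : List Int :=
  match pvScanB state_tuple pvPairsB with
  | none => []  -- Python raises here; excluded by Pre_
  | some (r, c) => (PySem.List.pyGet? pvMovesB (3 * r + c)).getD []

-- ===== PRECONDITION & SPEC =====
-- Pre_: A returns iff the 3x3 lexicographic scan reaches a 0 before running off the end of
-- a row/column list: some (r,c) with r,c < 3 holds 0 and every earlier scanned cell exists.
def Pre_get_valid_actions_q (state_tuple : List (List Int)) : Prop :=
  ∃ r < 3, ∃ c < 3,
    (state_tuple[r]?.bind (fun row => row[c]?)) = some 0 ∧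
    ∀ r' < 3, ∀ c' < 3, (r' < r ∨ (r' = r ∧ c' < c)) →
      c' < (state_tuple.getD r' []).length
instance (state_tuple : List (List Int)) : Decidable (Pre_get_valid_actions_q state_tuple) := by
  unfold Pre_get_valid_actions_q; infer_instance
def pvWitness_get_valid_actions_q : List (List Int) := [[1, 2, 3], [4, 0, 5], [6, 7, 8]]
def Spec_get_valid_actions_q (state_tuple : List (List Int)) (out : List Int) : Prop := out = get_valid_actions_q_alt state_tuple
instance (state_tuple : List (List Int)) (out : List Int) : Decidable (Spec_get_valid_actions_q state_tuple out) := by unfold Spec_get_valid_actions_q; infer_instance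

-- ===== CLAIM (what is proved, stated in full; the proofs are below) =====
def Claim_equal_get_valid_actions_q : Prop := ∀ (state_tuple : List (List Int)), Dom_get_valid_actions_q state_tuple → Pre_get_valid_actions_q state_tuple → Spec_get_valid_actions_q state_tuple (get_valid_actions_q state_tuple)

-- ===== LEMMAS AND PROOFS =====
lemma pvScan_eq (state : List (List Int)) : ∀ l, pvScanA state l = pvScanB state l := by
  intro l
  induction l with
  | nil => rfl
  | cons hd tl ih =>
    obtain ⟨r, c⟩ := hd
    simp only [pvScanA, pvScanB, ih]

lemma pvScan_mem (state : List (List Int)) : ∀ l p, pvScanA state l = some p → p ∈ l := by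
  intro l
  induction l with
  | nil => intro p h; simp [pvScanA] at h
  | cons hd tl ih =>
    obtain ⟨r, c⟩ := hd
    intro p h
    simp only [pvScanA] at h
    split at h
    · exact absurd h (by simp)
    · split at h
      · exact absurd h (by simp)
      · split at h
        · cases h; exact List.mem_cons_self
        · exact List.mem_cons_of_mem _ (ih p h)

-- ===== VERDICT (by name: the statement is the Claim_ definition above) =====
theorem get_valid_actions_q_spec : Claim_equal_get_valid_actions_q := by
  intro state_tuple _hdom _hpre
  unfold Spec_get_valid_actions_q get_valid_actions_q get_valid_actions_q_alt
  simp only [List.map_id']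
  rw [← pvScan_eq state_tuple pvPairsB]
  have hp : pvPairsB = pvPairsA := rfl
  rw [hp]
  cases h : pvScanA state_tuple pvPairsA with
  | none => rfl
  | some p =>
    obtain ⟨x, y⟩ := p
    have hmem := pvScan_mem state_tuple pvPairsA (x, y) h
    have hlit : pvPairsA = [(0,0),(0,1),(0,2),(1,0),(1,1),(1,2),(2,0),(2,1),(2,2)] := by decide
    rw [hlit] at hmem
    simp only [List.mem_cons, List.not_mem_nil, or_false] at hmem
    rcases hmem with h1 | h1 | h1 | h1 | h1 | h1 | h1 | h1 | h1 <;>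
      (cases h1; decide)
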